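-- pv_equiv track=rewrite | github.com/matteosan1/AoC | 2017/9.py | removeJunk
-- ===== SOURCE A (Python) =====
-- def removeJunk(line):
--     new_line = ""
--     i = 0
--     while i < len(line):
--         if line[i] == "!":
--             i += 2
--         else:
--             new_line += line[i]
--             i += 1
--     return new_line
-- ===== SOURCE B (Python) =====
-- import re
--
-- def removeJunk(line):
--     return re.sub(r'!.?', '', line, flags=re.DOTALL)
-- ===== Notes on version B (the rewrite author's own statement) =====
-- stated objective: faster
-- what changed: Replaces the hand-written index-based scan with quadratic string concatenation by a single non-overlapping regex substitution (pattern !.? with DOTALL) that deletes each bang and the character after it in one linear pass.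
import Mathlib
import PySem

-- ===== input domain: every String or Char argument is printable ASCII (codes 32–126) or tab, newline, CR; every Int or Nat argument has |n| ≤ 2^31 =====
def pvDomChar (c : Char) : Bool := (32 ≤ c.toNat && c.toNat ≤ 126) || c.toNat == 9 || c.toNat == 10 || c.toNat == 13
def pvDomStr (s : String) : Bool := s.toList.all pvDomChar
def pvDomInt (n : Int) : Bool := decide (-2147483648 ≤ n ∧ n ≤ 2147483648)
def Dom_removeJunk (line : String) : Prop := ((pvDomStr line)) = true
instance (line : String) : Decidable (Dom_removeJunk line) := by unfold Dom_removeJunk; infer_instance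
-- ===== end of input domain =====

-- B replaces A's index-based accumulate loop with a regex substitution re.sub(r'!.?', '', line) (DOTALL); same return value, ported here as a structural recursion that is exact for that pattern.
-- ===== PORT A =====
def removeJunkGo (s : List Char) (i : Nat) (acc : List Char) : List Char :=
  if h : i < s.length then
    if s[i] = '!' then removeJunkGo s (i + 2) acc
    else removeJunkGo s (i + 1) (acc ++ [s[i]])
  else acc
termination_by s.length - i

-- A: while-loop over a running index, appending kept characters to an accumulator
def removeJunk (line : String) : String := String.ofList (removeJunkGo line.toList 0 [])

-- ===== PORT B =====
-- B: re.sub(r'!.?', '', line, re.DOTALL) — exact: each non-overlapping match removes a '!'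
-- together with the following character if one exists (DOTALL: any character matches '.')
def subJunk : List Char → List Char
  | [] => []
  | c :: rest =>
    if c = '!' then
      match rest with
      | [] => []
      | _ :: r => subJunk r
    else c :: subJunk rest

def removeJunk_alt (line : String) : String := String.ofList (subJunk line.toList)

-- ===== PRECONDITION & SPEC =====
def Spec_removeJunk (line : String) (out : String) : Prop := out = removeJunk_alt line
instance (line : String) (out : String) : Decidable (Spec_removeJunk line out) := by unfold Spec_removeJunk; infer_instance

-- ===== CLAIM (what is proved, stated in full; the proofs are below) =====
def Claim_equal_removeJunk : Prop := ∀ (line : String), Dom_removeJunk line → Spec_removeJunk line (removeJunk line)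

-- ===== LEMMAS AND PROOFS =====

-- ===== VERDICT (by name: the statement is the Claim_ definition above) =====
theorem subJunk_cons_ne (c : Char) (rest : List Char) (h : ¬ c = '!') :
    subJunk (c :: rest) = c :: subJunk rest := by
  rw [subJunk.eq_def]
  simp [h]

theorem subJunk_bang_nil : subJunk ['!'] = [] := rfl

theorem subJunk_bang_cons (c : Char) (r : List Char) :
    subJunk ('!' :: c :: r) = subJunk r := rfl

theorem removeJunkGo_eq (s : List Char) (i : Nat) (acc : List Char) :
    removeJunkGo s i acc = acc ++ subJunk (s.drop i) := by
  refine removeJunkGo.induct s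
    (fun i acc => removeJunkGo s i acc = acc ++ subJunk (s.drop i)) ?_ ?_ ?_ i acc
  · intro i acc h hc ih
    rw [removeJunkGo, dif_pos h, if_pos hc, ih, List.drop_eq_getElem_cons h, hc]
    by_cases h1 : i + 1 < s.length
    · rw [List.drop_eq_getElem_cons h1, subJunk_bang_cons]
    · have h2 : s.drop (i + 1) = [] := List.drop_eq_nil_of_le (by omega)
      have h3 : s.drop (i + 2) = [] := List.drop_eq_nil_of_le (by omega)
      rw [h2, h3, subJunk_bang_nil, subJunk]
  · intro i acc h hc ih
    rw [removeJunkGo, dif_pos h, if_neg hc, ih]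
    rw [List.drop_eq_getElem_cons h, subJunk_cons_ne _ _ hc]
    simp
  · intro i acc h
    rw [removeJunkGo, dif_neg h, List.drop_eq_nil_of_le (by omega), subJunk]
    simp

theorem removeJunk_spec : Claim_equal_removeJunk := by
  intro line _
  unfold Spec_removeJunk removeJunk removeJunk_alt
  rw [removeJunkGo_eq]
  simp
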